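-- pv_equiv track=rewrite | github.com/NumberZeroC/learning-agent | ai-news-daily/ai_news_daily.py | parse_news_content
-- ===== SOURCE A (Python) =====
-- def parse_news_content(content: str) -> list:
--     """解析新闻内容，提取关键信息"""
--     news_items = []
--
--     # 简化解析逻辑（实际应该用 BeautifulSoup 等）
--     # 这里返回示例结构
--     lines = content.split('\n')
--     current_item = {}
--
--     for line in lines:
--         line = line.strip()
--         if not line:
--             continue
--
--         # 检测标题
--         if line.startswith('#') or (len(line) < 100 and line.endswith('.')):
--             if current_item:
--                 news_items.append(current_item)
--             current_item = {
--                 "title": line,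
--                 "summary": "",
--                 "source": "",
--                 "category": "general"
--             }
--         elif current_item and not current_item.get("summary"):
--             current_item["summary"] = line[:200]
--
--     if current_item:
--         news_items.append(current_item)
--
--     return news_items[:10]  # 限制数量
-- ===== SOURCE B (Python) =====
-- def _is_title(line: str) -> bool:
--     return line.startswith('#') or (len(line) < 100 and line.endswith('.'))
--
--
-- def parse_news_content(content: str) -> list:
--     """解析新闻内容，提取关键信息 (two-phase: clean lines, then group by title boundaries)"""
--     lines = [s for s in (raw.strip() for raw in content.split('\n')) if s]
--     n = len(lines)
--     # drop everything before the first title line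
--     i = 0
--     while i < n and not _is_title(lines[i]):
--         i += 1
--     items = []
--     while i < n:
--         title = lines[i]
--         i += 1
--         if i < n and not _is_title(lines[i]):
--             summary = lines[i][:200]
--         else:
--             summary = ""
--         while i < n and not _is_title(lines[i]):
--             i += 1
--         items.append({"title": title, "summary": summary, "source": "", "category": "general"})
--     return items[:10]
-- ===== Notes on version B (the rewrite author's own statement) =====
-- stated objective: alternative
-- what changed: Replaces A's single pass with a mutated current_item dict accumulator (append-on-next-title, summary-set-once via dict.get) by a two-phase decomposition: first build the list of stripped non-empty lines, then an index-driven grouping loop that skips pre-title lines, takes each title, reads the summary from the immediately following non-title line, and skips to the next title boundary.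
import Mathlib
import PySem

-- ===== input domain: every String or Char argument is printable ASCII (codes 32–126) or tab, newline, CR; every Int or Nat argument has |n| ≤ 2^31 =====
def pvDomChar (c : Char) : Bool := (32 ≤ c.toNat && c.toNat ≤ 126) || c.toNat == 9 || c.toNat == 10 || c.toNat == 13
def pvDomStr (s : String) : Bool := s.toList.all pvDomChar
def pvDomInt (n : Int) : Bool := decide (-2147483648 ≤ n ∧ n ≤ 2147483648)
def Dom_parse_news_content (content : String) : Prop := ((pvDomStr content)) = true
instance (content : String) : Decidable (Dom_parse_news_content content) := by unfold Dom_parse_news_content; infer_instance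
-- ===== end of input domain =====

-- B replaces A's running current_item-dict accumulator with a two-phase pass (clean lines, then
-- group at title boundaries); objective: alternative decomposition, same asymptotic cost.


-- ===== PORT A =====
-- loop body of A's `for line in lines` (strip, skip blanks, title / first-summary branches)
def pvStepA (st : List (List (String × String)) × PySem.Dict String String) (rawline : String) :
    List (List (String × String)) × PySem.Dict String String :=
  let line := PySem.Str.strip rawline
  if line = "" then st
  else if PySem.Str.startswith line "#" ||
      (decide (PySem.Str.len line < 100) && PySem.Str.endswith line ".") then
    ((if st.2.items.isEmpty then st.1 else st.1 ++ [st.2.items]),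
     PySem.Dict.mk [("title", line), ("summary", ""), ("source", ""), ("category", "general")])
  else if !st.2.items.isEmpty &&
      !(match PySem.Dict.get? st.2 "summary" with
        | some s => !(s == "")
        | none => false) then
    (st.1, PySem.Dict.insert st.2 "summary" (PySem.Str.slice line none (some 200)))
  else st

def parse_news_content (content : String) : List (List (String × String)) :=
  let lines := (PySem.Str.split? content "\n").getD []
  let st := lines.foldl pvStepA ([], PySem.Dict.empty)
  let news_items := if st.2.items.isEmpty then st.1 else st.1 ++ [st.2.items]
  PySem.List.slice news_items none (some 10)

-- ===== PORT B =====
def pvIsTitle (line : String) : Bool :=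
  PySem.Str.startswith line "#" ||
    (decide (PySem.Str.len line < 100) && PySem.Str.endswith line ".")

def pvItem (title summary : String) : List (String × String) :=
  [("title", title), ("summary", summary), ("source", ""), ("category", "general")]

-- the `while i < n` grouping loop of Source B, with the remaining suffix of `lines` as the loop state
def pvAssemble : List String → List (List (String × String))
  | [] => []
  | t :: rest =>
    let summary := match rest with
      | [] => ""
      | r :: _ => if pvIsTitle r then "" else PySem.Str.slice r none (some 200)
    pvItem t summary :: pvAssemble (rest.dropWhile (fun l => !pvIsTitle l))
termination_by ls => ls.length
decreasing_by
  exact Nat.lt_succ_of_le (List.length_dropWhile_le _ _)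

def parse_news_content_alt (content : String) : List (List (String × String)) :=
  let lines := ((PySem.Str.split? content "\n").getD []).filterMap
    (fun raw => let s := PySem.Str.strip raw; if s = "" then none else some s)
  PySem.List.slice (pvAssemble (lines.dropWhile (fun l => !pvIsTitle l))) none (some 10)

-- ===== PRECONDITION & SPEC =====
def Spec_parse_news_content (content : String) (out : List (List (String × String))) : Prop := out = parse_news_content_alt content
instance (content : String) (out : List (List (String × String))) : Decidable (Spec_parse_news_content content out) := by unfold Spec_parse_news_content; infer_instance

-- ===== CLAIM (what is proved, stated in full; the proofs are below) =====
def Claim_equal_parse_news_content : Prop := ∀ (content : String), Dom_parse_news_content content → Spec_parse_news_content content (parse_news_content content)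

-- ===== LEMMAS AND PROOFS =====

-- A's step on an already-stripped, non-empty line
def pvCore (st : List (List (String × String)) × PySem.Dict String String) (line : String) :
    List (List (String × String)) × PySem.Dict String String :=
  if pvIsTitle line then
    ((if st.2.items.isEmpty then st.1 else st.1 ++ [st.2.items]),
     PySem.Dict.mk (pvItem line ""))
  else if !st.2.items.isEmpty &&
      !(match PySem.Dict.get? st.2 "summary" with
        | some s => !(s == "")
        | none => false) then
    (st.1, PySem.Dict.insert st.2 "summary" (PySem.Str.slice line none (some 200)))
  else st

def pvFinal (st : List (List (String × String)) × PySem.Dict String String) :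
    List (List (String × String)) :=
  if st.2.items.isEmpty then st.1 else st.1 ++ [st.2.items]

lemma pvAssemble_nil : pvAssemble [] = [] := by
  rw [pvAssemble.eq_def]

lemma pvAssemble_cons (t : String) (rest : List String) :
    pvAssemble (t :: rest) =
      pvItem t (match rest with
        | [] => ""
        | r :: _ => if pvIsTitle r then "" else PySem.Str.slice r none (some 200)) ::
        pvAssemble (rest.dropWhile (fun l => !pvIsTitle l)) := by
  rw [pvAssemble.eq_def]

lemma pvStepA_eq (st : List (List (String × String)) × PySem.Dict String String) (raw : String) :
    pvStepA st raw =
      (if PySem.Str.strip raw = "" then st else pvCore st (PySem.Str.strip raw)) := by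
  simp only [pvStepA, pvCore, pvIsTitle, pvItem]

lemma foldl_stepA_filter (raws : List String)
    (st : List (List (String × String)) × PySem.Dict String String) :
    raws.foldl pvStepA st =
      (raws.filterMap (fun raw =>
        let s := PySem.Str.strip raw; if s = "" then none else some s)).foldl pvCore st := by
  induction raws generalizing st with
  | nil => rfl
  | cons r rs ih =>
    simp only [List.foldl_cons, List.filterMap_cons, pvStepA_eq]
    by_cases h : PySem.Str.strip r = "" <;> simp [h, ih]

lemma pvFinal_prefix (acc : List (List (String × String)))
    (st : List (List (String × String)) × PySem.Dict String String) :
    pvFinal (acc ++ st.1, st.2) = acc ++ pvFinal st := by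
  unfold pvFinal
  split_ifs <;> simp

lemma pvCore_fst (acc : List (List (String × String))) (cur : PySem.Dict String String)
    (l : String) :
    pvCore (acc, cur) l = (acc ++ (pvCore ([], cur) l).1, (pvCore ([], cur) l).2) := by
  unfold pvCore
  split_ifs <;> simp

lemma foldl_core_prefix (ls : List String) (acc : List (List (String × String)))
    (cur : PySem.Dict String String) :
    ls.foldl pvCore (acc, cur) =
      (acc ++ (ls.foldl pvCore ([], cur)).1, (ls.foldl pvCore ([], cur)).2) := by
  induction ls generalizing acc cur with
  | nil => simp
  | cons l ls ih =>
    simp only [List.foldl_cons]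
    rw [pvCore_fst, ih, ih ((pvCore ([], cur) l).1)]
    simp

lemma pvCore_empty_nonTitle (l : String) (h : pvIsTitle l = false) :
    pvCore ([], PySem.Dict.empty) l = ([], PySem.Dict.empty) := by
  simp [pvCore, h, PySem.Dict.empty]

lemma foldl_core_empty_dropWhile (ls : List String) :
    ls.foldl pvCore ([], PySem.Dict.empty) =
      (ls.dropWhile (fun l => !pvIsTitle l)).foldl pvCore ([], PySem.Dict.empty) := by
  induction ls with
  | nil => rfl
  | cons l ls ih =>
    by_cases h : pvIsTitle l
    · simp [h]
    · simp only [List.foldl_cons, List.dropWhile_cons, h,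
        pvCore_empty_nonTitle l (by simp [h])]
      simpa using ih

lemma slice200_ne_empty (l : String) (h : l ≠ "") :
    PySem.Str.slice l none (some 200) ≠ "" := by
  intro hc
  have h1 : (PySem.Str.slice l none (some 200)).toList = [] := by rw [hc]; rfl
  rw [PySem.Str.toList_slice, PySem.Chars.slice_eq_listSlice,
    PySem.List.slice_to _ (by norm_num)] at h1
  rcases List.take_eq_nil_iff.mp h1 with h2 | h2
  · norm_num at h2
  · exact h (String.toList_eq_nil_iff.mp h2)

lemma pvMain (ls : List String) (hne : ∀ l ∈ ls, l ≠ "") (t : String) :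
    (pvFinal (ls.foldl pvCore ([], PySem.Dict.mk (pvItem t ""))) = pvAssemble (t :: ls)) ∧
    (∀ s, s ≠ "" →
      pvFinal (ls.foldl pvCore ([], PySem.Dict.mk (pvItem t s))) =
        pvItem t s :: pvAssemble (ls.dropWhile (fun l => !pvIsTitle l))) := by
  induction ls generalizing t with
  | nil =>
    constructor
    · simp [pvFinal, pvAssemble_nil, pvAssemble_cons, pvItem]
    · intro s _
      simp [pvFinal, pvAssemble_nil, pvItem]
  | cons l rest ih =>
    have hl : l ≠ "" := hne l (by simp)
    have hrest : ∀ x ∈ rest, x ≠ "" := fun x hx => hne x (by simp [hx])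
    have ihl := ih hrest
    constructor
    · -- current item still has empty summary
      by_cases h : pvIsTitle l
      · rw [List.foldl_cons]
        have hstep : pvCore ([], PySem.Dict.mk (pvItem t "")) l =
            ([pvItem t ""], PySem.Dict.mk (pvItem l "")) := by
          simp [pvCore, h, pvItem]
        rw [hstep, foldl_core_prefix,
          show ([pvItem t ""] ++ (rest.foldl pvCore ([], PySem.Dict.mk (pvItem l ""))).1,
              (rest.foldl pvCore ([], PySem.Dict.mk (pvItem l ""))).2) =
            ([pvItem t ""] ++ (rest.foldl pvCore ([], PySem.Dict.mk (pvItem l ""))).1,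
              (rest.foldl pvCore ([], PySem.Dict.mk (pvItem l ""))).snd) from rfl,
          pvFinal_prefix, (ihl l).1, pvAssemble_cons t (l :: rest)]
        simp [h]
      · rw [List.foldl_cons]
        have hstep : pvCore ([], PySem.Dict.mk (pvItem t "")) l =
            ([], PySem.Dict.mk (pvItem t (PySem.Str.slice l none (some 200)))) := by
          simp only [pvCore, h, Bool.false_eq_true, if_false, pvItem]
          rfl
        rw [hstep, (ihl t).2 _ (slice200_ne_empty l hl), pvAssemble_cons t (l :: rest)]
        simp [h]
    · -- current item already carries a non-empty summary s
      intro s hs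
      by_cases h : pvIsTitle l
      · rw [List.foldl_cons]
        have hstep : pvCore ([], PySem.Dict.mk (pvItem t s)) l =
            ([pvItem t s], PySem.Dict.mk (pvItem l "")) := by
          simp [pvCore, h, pvItem]
        rw [hstep, foldl_core_prefix, pvFinal_prefix, (ihl l).1, List.dropWhile_cons]
        simp [h]
      · rw [List.foldl_cons]
        have hstep : pvCore ([], PySem.Dict.mk (pvItem t s)) l =
            ([], PySem.Dict.mk (pvItem t s)) := by
          have hb : (s == "") = false := by simpa using hs
          simp only [pvCore, h, Bool.false_eq_true, if_false, pvItem, PySem.Dict.get?]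
          simp [hb]
        rw [hstep, (ihl t).2 s hs, List.dropWhile_cons]
        simp [h]

lemma filterMap_strip_ne (raws : List String) :
    ∀ l ∈ raws.filterMap (fun raw =>
      let s := PySem.Str.strip raw; if s = "" then none else some s), l ≠ "" := by
  intro l hl
  rcases List.mem_filterMap.mp hl with ⟨raw, _, hr⟩
  by_cases h : PySem.Str.strip raw = "" <;> simp [h] at hr
  exact hr ▸ h

lemma dropWhile_cons_pred {α : Type} (p : α → Bool) (l : List α) (t : α) (rest : List α)
    (h : l.dropWhile p = t :: rest) : p t = false := by
  induction l with
  | nil => simp at h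
  | cons x xs ih =>
    rw [List.dropWhile_cons] at h
    by_cases hp : p x
    · rw [if_pos hp] at h
      exact ih h
    · rw [if_neg hp] at h
      cases h
      simpa using hp

-- ===== VERDICT (by name: the statement is the Claim_ definition above) =====
theorem parse_news_content_spec : Claim_equal_parse_news_content := by
  intro content _
  show parse_news_content content = parse_news_content_alt content
  simp only [parse_news_content, parse_news_content_alt]
  rw [foldl_stepA_filter]
  set ls := ((PySem.Str.split? content "\n").getD []).filterMap
    (fun raw => let s := PySem.Str.strip raw; if s = "" then none else some s) with hls
  have hne : ∀ l ∈ ls, l ≠ "" := by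
    rw [hls]
    exact filterMap_strip_ne _
  rw [foldl_core_empty_dropWhile]
  show PySem.List.slice (pvFinal _) none (some 10) = _
  cases hd : ls.dropWhile (fun l => !pvIsTitle l) with
  | nil =>
    rw [pvAssemble_nil]
    rfl
  | cons t rest =>
    have ht : pvIsTitle t = true := by
      have := dropWhile_cons_pred _ _ _ _ hd
      simpa using this
    have hrest : ∀ x ∈ rest, x ≠ "" := fun x hx =>
      hne x (List.Sublist.mem (by rw [hd]; exact List.mem_cons_of_mem _ hx)
        (List.dropWhile_sublist _))
    have hstep : pvCore ([], PySem.Dict.empty) t = ([], PySem.Dict.mk (pvItem t "")) := by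
      simp [pvCore, ht, pvItem, PySem.Dict.empty]
    rw [List.foldl_cons, hstep, (pvMain rest hrest t).1]
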